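-- pv_equiv track=rewrite | github.com/Tariq60/FactVsOp | src/utils/read_and_norm_arg_multipub_copy.py | sent_types_counts
-- ===== SOURCE A (Python) =====
-- def get_sent_types(sents_labels, typ, n_sent):
--     '''Returns counts of input sentence type + article length if less than n_sent (otherwise returns n_sent)'''
--     typ_counts = [1 if label == typ else 0 for _, label in sents_labels]
--
--     article_length_list = [1 for _, _ in sents_labels]
--
--     if len(typ_counts) == n_sent:
--         return typ_counts, article_length_list
--
--     elif len(typ_counts) > n_sent:
--         return typ_counts[:n_sent], article_length_list[:n_sent]
--
--     else:
--         for i in range(n_sent - len(typ_counts)):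
--             typ_counts.append(0)
--             article_length_list.append(0)
--         return typ_counts, article_length_list
--
-- def sent_types_counts(sentences, predictions, n_sent, add_one_pred=True):
--     'Retruns article splitted along with their sentences labels'
--
--     if add_one_pred:
--         predictions.insert(0,'0\n')
--     assert len(sentences) == len(predictions)
--
--     article, article_splits, article_lengths = [], [], []
--     claim_norm_counts, premise_norm_counts, none_norm_counts = [], [], []
--     for i, (sent, pred) in enumerate(zip(sentences, predictions)):
--         if sent == 'ARTICLE_SPLIT_LINE\t0\n':
--             article_splits.append(article)
--             none_count, none_article_length = get_sent_types(article, 0, n_sent)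
--             claim_count, claim_article_length = get_sent_types(article, 1, n_sent)
--             premise_count, premise_article_length = get_sent_types(article, 2, n_sent)
--             assert sum(none_article_length) == sum(claim_article_length) == sum(premise_article_length)
--
--             none_norm_counts.append(none_count)
--             claim_norm_counts.append(claim_count)
--             premise_norm_counts.append(premise_count)
--             article_lengths.append(none_article_length)
--
--             article = []
--         else:
--             article.append(( sent.split('\t')[0], int(pred.rstrip()) ))
--
--     return claim_norm_counts, premise_norm_counts, none_norm_counts, article_lengths
-- ===== SOURCE B (Python) =====
-- def sent_types_counts(sentences, predictions, n_sent, add_one_pred=True):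
--     'Three-stage pipeline: parse one label stream, cut it into articles, one-hot rows + transpose.'
--     if add_one_pred:
--         predictions.insert(0, '0\n')
--     assert len(sentences) == len(predictions)
--     SPLIT = 'ARTICLE_SPLIT_LINE\t0\n'
--
--     # stage 1: one label stream; None marks an article boundary
--     labels = [None if s == SPLIT else int(p.rstrip())
--               for s, p in zip(sentences, predictions)]
--
--     # stage 2: cut the stream into articles (the tail after the last marker is dropped)
--     articles, cur = [], []
--     for l in labels:
--         if l is None:
--             articles.append(cur)
--             cur = []
--         else:
--             cur.append(l)
--
--     # stage 3: per article, one-hot rows (none, claim, premise, length), then transpose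
--     EYE = {0: (1, 0, 0, 1), 1: (0, 1, 0, 1), 2: (0, 0, 1, 1)}
--     claim_norm_counts, premise_norm_counts, none_norm_counts, article_lengths = [], [], [], []
--     for art in articles:
--         rows = [EYE.get(l, (0, 0, 0, 1)) for l in art[:n_sent]]
--         rows += [(0, 0, 0, 0)] * (n_sent - len(rows))
--         cols = list(zip(*rows)) or [(), (), (), ()]
--         none_norm_counts.append(list(cols[0]))
--         claim_norm_counts.append(list(cols[1]))
--         premise_norm_counts.append(list(cols[2]))
--         article_lengths.append(list(cols[3]))
--
--     return claim_norm_counts, premise_norm_counts, none_norm_counts, article_lengths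
-- ===== Notes on version B (the rewrite author's own statement) =====
-- stated objective: alternative
-- what changed: Replaces A's interleaved buffering loop with three per-type helper scans by a three-stage pipeline: parse the whole input into one Optional label stream, cut that stream into article label lists, then per article build one-hot (none,claim,premise,length) rows via a lookup table and transpose them into the four output columns.
import Mathlib
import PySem

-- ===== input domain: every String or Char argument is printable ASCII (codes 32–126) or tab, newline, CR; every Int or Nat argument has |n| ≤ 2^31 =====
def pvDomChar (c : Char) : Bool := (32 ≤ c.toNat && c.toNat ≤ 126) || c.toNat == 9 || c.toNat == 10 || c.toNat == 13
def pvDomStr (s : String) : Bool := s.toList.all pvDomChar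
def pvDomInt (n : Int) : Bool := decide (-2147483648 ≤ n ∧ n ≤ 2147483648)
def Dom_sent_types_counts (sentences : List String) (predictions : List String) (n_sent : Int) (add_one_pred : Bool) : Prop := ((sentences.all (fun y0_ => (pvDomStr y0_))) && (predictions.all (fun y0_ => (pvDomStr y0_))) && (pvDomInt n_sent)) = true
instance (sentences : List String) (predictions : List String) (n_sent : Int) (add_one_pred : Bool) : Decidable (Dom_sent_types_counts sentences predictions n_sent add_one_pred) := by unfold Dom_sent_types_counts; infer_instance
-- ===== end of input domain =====

-- ===== PORT A =====
-- B replaces A's interleaved loop (three per-type helper scans per article) with a parse/split/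
-- one-hot-transpose pipeline; proved equal on all inputs where A returns (Pre_).
-- NOTE: A mutates `predictions` in place (insert of '0\n' when add_one_pred); B performs the same
-- mutation; the equivalence proved here is about the return value.

-- port of get_sent_types
def pvGetSentTypes (sents_labels : List (String × Int)) (typ : Int) (n_sent : Int) :
    List Int × List Int :=
  let typ_counts : List Int := sents_labels.map (fun p => if p.2 = typ then 1 else 0)
  let article_length_list : List Int := sents_labels.map (fun _ => 1)
  if (typ_counts.length : Int) = n_sent then (typ_counts, article_length_list)
  else if (typ_counts.length : Int) > n_sent then
    (PySem.List.slice typ_counts none (some n_sent),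
     PySem.List.slice article_length_list none (some n_sent))
  else
    (PySem.List.pyRange 0 (n_sent - (typ_counts.length : Int)) 1).foldl
      (fun st _ => (st.1 ++ [0], st.2 ++ [0])) (typ_counts, article_length_list)

-- A's loop body; state = (article, article_splits, article_lengths, claim, premise, none) in declaration order.
-- int(pred.rstrip()) raises ValueError where ofStr? is none — those inputs are excluded by Pre_ (.getD 0 is never reached there).
def pvStepA (n_sent : Int)
    (st : List (String × Int) × List (List (String × Int)) × List (List Int) × List (List Int) × List (List Int) × List (List Int))
    (sp : String × String) :
    List (String × Int) × List (List (String × Int)) × List (List Int) × List (List Int) × List (List Int) × List (List Int) :=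
  if sp.1 = "ARTICLE_SPLIT_LINE\t0\n" then
    let r0 := pvGetSentTypes st.1 0 n_sent
    let r1 := pvGetSentTypes st.1 1 n_sent
    let r2 := pvGetSentTypes st.1 2 n_sent
    ([], st.2.1 ++ [st.1], st.2.2.1 ++ [r0.2],
     st.2.2.2.1 ++ [r1.1], st.2.2.2.2.1 ++ [r2.1], st.2.2.2.2.2 ++ [r0.1])
  else
    (st.1 ++ [(((PySem.Str.split? sp.1 "\t").getD []).headD "",
               (PySem.Int.ofStr? (PySem.Str.rstrip sp.2)).getD 0)],
     st.2.1, st.2.2.1, st.2.2.2.1, st.2.2.2.2.1, st.2.2.2.2.2)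

def sent_types_counts (sentences : List String) (predictions : List String) (n_sent : Int) (add_one_pred : Bool) : List (List Int) × List (List Int) × List (List Int) × List (List Int) :=
  -- predictions.insert(0,'0\n') ; assert len(sentences)==len(predictions) raises where lengths differ — excluded by Pre_
  let preds := if add_one_pred then "0\n" :: predictions else predictions
  let st := (sentences.zip preds).foldl (pvStepA n_sent) ([], [], [], [], [], [])
  (st.2.2.2.1, st.2.2.2.2.1, st.2.2.2.2.2, st.2.2.1)

-- ===== PORT B =====
-- EYE.get(l, (0,0,0,1)): dict lookup with the literal int keys 0,1,2 — ported by hand, exact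
def pvEye (l : Int) : Int × Int × Int × Int :=
  if l = 0 then (1, 0, 0, 1) else if l = 1 then (0, 1, 0, 1)
  else if l = 2 then (0, 0, 1, 1) else (0, 0, 0, 1)

-- stage-2 loop body; state = (cur, articles)
def pvSplitStep (st : List Int × List (List Int)) (l : Option Int) : List Int × List (List Int) :=
  match l with
  | none => ([], st.2 ++ [st.1])
  | some v => (st.1 ++ [v], st.2)

-- stage-3 loop body; outs = (claim, premise, none, lengths) result lists.
-- `cols = list(zip(*rows)) or [(),(),(),()]` is ported as the fixed-arity-4 transpose (four
-- component maps) with the empty-rows guard — exact for rows of 4-tuples.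
def pvEmitStep (n_sent : Int)
    (outs : List (List Int) × List (List Int) × List (List Int) × List (List Int))
    (art : List Int) :
    List (List Int) × List (List Int) × List (List Int) × List (List Int) :=
  let sl := PySem.List.slice art none (some n_sent)
  let rows := sl.map pvEye ++
    List.replicate (n_sent - (sl.length : Int)).toNat ((0, 0, 0, 0) : Int × Int × Int × Int)
  let cols :=
    if rows.isEmpty then (([] : List Int), ([] : List Int), ([] : List Int), ([] : List Int))
    else (rows.map (fun r => r.1), rows.map (fun r => r.2.1),
          rows.map (fun r => r.2.2.1), rows.map (fun r => r.2.2.2))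
  (outs.1 ++ [cols.2.1], outs.2.1 ++ [cols.2.2.1], outs.2.2.1 ++ [cols.1], outs.2.2.2 ++ [cols.2.2.2])

def sent_types_counts_alt (sentences : List String) (predictions : List String) (n_sent : Int) (add_one_pred : Bool) : List (List Int) × List (List Int) × List (List Int) × List (List Int) :=
  let preds := if add_one_pred then "0\n" :: predictions else predictions
  -- stage 1: labels = [None if s == SPLIT else int(p.rstrip()) for s, p in zip(...)]
  -- (int() raises ValueError where ofStr? is none — excluded by Pre_, .getD 0 never reached)
  let labels : List (Option Int) := (sentences.zip preds).map (fun sp =>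
    if sp.1 = "ARTICLE_SPLIT_LINE\t0\n" then none
    else some ((PySem.Int.ofStr? (PySem.Str.rstrip sp.2)).getD 0))
  -- stage 2
  let p := labels.foldl pvSplitStep ([], [])
  -- stage 3
  p.2.foldl (pvEmitStep n_sent) ([], [], [], [])

-- ===== PRECONDITION & SPEC =====
-- Pre_ = exactly the inputs where Python A returns: the length assertion holds (after the conditional
-- insert of '0\n') and every prediction paired with a non-split sentence parses as int after rstrip
-- (otherwise A raises AssertionError / ValueError).
def Pre_sent_types_counts (sentences : List String) (predictions : List String) (n_sent : Int) (add_one_pred : Bool) : Prop :=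
  let preds := if add_one_pred then "0\n" :: predictions else predictions
  sentences.length = preds.length ∧
  ∀ sp ∈ sentences.zip preds, sp.1 ≠ "ARTICLE_SPLIT_LINE\t0\n" →
    (PySem.Int.ofStr? (PySem.Str.rstrip sp.2)).isSome = true
instance (sentences : List String) (predictions : List String) (n_sent : Int) (add_one_pred : Bool) : Decidable (Pre_sent_types_counts sentences predictions n_sent add_one_pred) := by unfold Pre_sent_types_counts; infer_instance

def pvWitness_sent_types_counts : List String × List String × Int × Bool :=
  (["a\tb", "ARTICLE_SPLIT_LINE\t0\n"], ["1\n"], 2, true)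

def Spec_sent_types_counts (sentences : List String) (predictions : List String) (n_sent : Int) (add_one_pred : Bool) (out : List (List Int) × List (List Int) × List (List Int) × List (List Int)) : Prop := out = sent_types_counts_alt sentences predictions n_sent add_one_pred
instance (sentences : List String) (predictions : List String) (n_sent : Int) (add_one_pred : Bool) (out : List (List Int) × List (List Int) × List (List Int) × List (List Int)) : Decidable (Spec_sent_types_counts sentences predictions n_sent add_one_pred out) := by unfold Spec_sent_types_counts; infer_instance

-- ===== CLAIM (what is proved, stated in full; the proofs are below) =====
def Claim_equal_sent_types_counts : Prop := ∀ (sentences : List String) (predictions : List String) (n_sent : Int) (add_one_pred : Bool), Dom_sent_types_counts sentences predictions n_sent add_one_pred → Pre_sent_types_counts sentences predictions n_sent add_one_pred → Spec_sent_types_counts sentences predictions n_sent add_one_pred (sent_types_counts sentences predictions n_sent add_one_pred)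

-- ===== LEMMAS AND PROOFS =====

-- B's state as a function of A's state: cur labels = second components of the article buffer,
-- outs = (claim, premise, none, lengths)
def pvProj (sa : List (String × Int) × List (List (String × Int)) × List (List Int) × List (List Int) × List (List Int) × List (List Int)) :
    List Int × List (List Int) × List (List Int) × List (List Int) × List (List Int) :=
  (sa.1.map Prod.snd, sa.2.2.2.1, sa.2.2.2.2.1, sa.2.2.2.2.2, sa.2.2.1)

-- fused single-pass step for the proof: stage 1∘2∘3 of B, one zip element at a time
def pvOFused (n_sent : Int)
    (st : List Int × List (List Int) × List (List Int) × List (List Int) × List (List Int))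
    (l : Option Int) :
    List Int × List (List Int) × List (List Int) × List (List Int) × List (List Int) :=
  match l with
  | none => ([], pvEmitStep n_sent st.2 st.1)
  | some v => (st.1 ++ [v], st.2)

def pvFused (n_sent : Int)
    (st : List Int × List (List Int) × List (List Int) × List (List Int) × List (List Int))
    (sp : String × String) :
    List Int × List (List Int) × List (List Int) × List (List Int) × List (List Int) :=
  pvOFused n_sent st (if sp.1 = "ARTICLE_SPLIT_LINE\t0\n" then none
    else some ((PySem.Int.ofStr? (PySem.Str.rstrip sp.2)).getD 0))

theorem pv_padfold_list (l : List Int) (x y : List Int) :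
    l.foldl (fun (st : List Int × List Int) _ => (st.1 ++ [0], st.2 ++ [0])) (x, y)
      = (x ++ List.replicate l.length 0, y ++ List.replicate l.length 0) := by
  induction l generalizing x y with
  | nil => simp
  | cons h t ih => simp [ih, List.replicate_succ]

theorem pv_padfold (k : Int) (x y : List Int) :
    (PySem.List.pyRange 0 k 1).foldl (fun (st : List Int × List Int) _ => (st.1 ++ [0], st.2 ++ [0])) (x, y)
      = (x ++ List.replicate k.toNat 0, y ++ List.replicate k.toNat 0) := by
  have hl : (PySem.List.pyRange 0 k 1).length = k.toNat := by
    simp [PySem.List.pyRange]; omega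
  rw [pv_padfold_list, hl]

theorem pv_slice_take {α : Type} (xs : List α) (n : Int) :
    PySem.List.slice xs none (some n) = xs.take (PySem.List.clampIdx xs.length n) := by
  simp [PySem.List.slice]

theorem pv_getSent_eq (article : List (String × Int)) (typ n : Int) :
    pvGetSentTypes article typ n =
      ((PySem.List.slice (article.map Prod.snd) none (some n)).map (fun l => if l = typ then 1 else 0)
          ++ List.replicate (n - (article.length : Int)).toNat 0,
       (PySem.List.slice (article.map Prod.snd) none (some n)).map (fun _ => (1 : Int))
          ++ List.replicate (n - (article.length : Int)).toNat 0) := by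
  unfold pvGetSentTypes
  rw [pv_slice_take]
  simp only [List.length_map, List.map_take, List.map_map]
  by_cases h1 : (article.length : Int) = n
  · rw [if_pos h1]
    have hK : PySem.List.clampIdx article.length n = article.length := by
      simp [PySem.List.clampIdx]; split_ifs <;> omega
    have hpad : (n - (article.length : Int)).toNat = 0 := by omega
    rw [hK, hpad]
    simp [Function.comp_def]
  · by_cases h2 : (article.length : Int) > n
    · rw [if_neg h1, if_pos h2]
      have hpad : (n - (article.length : Int)).toNat = 0 := by omega
      rw [hpad, pv_slice_take, pv_slice_take]
      simp only [List.length_map, List.replicate_zero, List.append_nil]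
      simp [Function.comp_def]
    · rw [if_neg h1, if_neg h2, pv_padfold]
      have hK : PySem.List.clampIdx article.length n = article.length := by
        simp [PySem.List.clampIdx]; split_ifs <;> omega
      rw [hK]
      simp [Function.comp_def]

theorem pvEye_none (l : Int) : (pvEye l).1 = if l = 0 then 1 else 0 := by
  unfold pvEye; split_ifs <;> simp_all
theorem pvEye_claim (l : Int) : (pvEye l).2.1 = if l = 1 then 1 else 0 := by
  unfold pvEye; split_ifs <;> simp_all
theorem pvEye_premise (l : Int) : (pvEye l).2.2.1 = if l = 2 then 1 else 0 := by
  unfold pvEye; split_ifs <;> simp_all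
theorem pvEye_len (l : Int) : (pvEye l).2.2.2 = 1 := by
  unfold pvEye; split_ifs <;> rfl

-- B's per-article build-and-transpose in terms of per-type column maps
theorem pvEmitStep_eq (n : Int) (art : List Int)
    (outs : List (List Int) × List (List Int) × List (List Int) × List (List Int)) :
    pvEmitStep n outs art =
      (outs.1 ++ [(PySem.List.slice art none (some n)).map (fun l => if l = 1 then 1 else 0)
          ++ List.replicate (n - (art.length : Int)).toNat 0],
       outs.2.1 ++ [(PySem.List.slice art none (some n)).map (fun l => if l = 2 then 1 else 0)
          ++ List.replicate (n - (art.length : Int)).toNat 0],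
       outs.2.2.1 ++ [(PySem.List.slice art none (some n)).map (fun l => if l = 0 then 1 else 0)
          ++ List.replicate (n - (art.length : Int)).toNat 0],
       outs.2.2.2 ++ [(PySem.List.slice art none (some n)).map (fun _ => (1 : Int))
          ++ List.replicate (n - (art.length : Int)).toNat 0]) := by
  unfold pvEmitStep
  have hpad : (n - ((PySem.List.slice art none (some n)).length : Int)).toNat
      = (n - (art.length : Int)).toNat := by
    rw [pv_slice_take]
    simp only [List.length_take]
    simp [PySem.List.clampIdx]; split_ifs <;> omega
  dsimp only
  rw [hpad]
  by_cases hr : (PySem.List.slice art none (some n)).map pvEye ++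
      List.replicate (n - (art.length : Int)).toNat ((0, 0, 0, 0) : Int × Int × Int × Int) = []
  · have h1 := (List.eq_nil_of_append_eq_nil hr).1
    have h2 := (List.eq_nil_of_append_eq_nil hr).2
    have h1' : PySem.List.slice art none (some n) = [] := by simpa using h1
    have h2' : (n - (art.length : Int)).toNat = 0 := by simpa using h2
    simp [hr, h1', h2']
  · simp only [List.isEmpty_iff, hr, if_neg, List.map_append, List.map_map, List.map_replicate]
    simp [Function.comp_def, pvEye_none, pvEye_claim, pvEye_premise, pvEye_len]

-- B's per-article transpose = A's three get_sent_types results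
theorem pv_emit_eq (n : Int) (article : List (String × Int))
    (outs : List (List Int) × List (List Int) × List (List Int) × List (List Int)) :
    pvEmitStep n outs (article.map Prod.snd) =
      (outs.1 ++ [(pvGetSentTypes article 1 n).1],
       outs.2.1 ++ [(pvGetSentTypes article 2 n).1],
       outs.2.2.1 ++ [(pvGetSentTypes article 0 n).1],
       outs.2.2.2 ++ [(pvGetSentTypes article 0 n).2]) := by
  rw [pvEmitStep_eq]
  simp [pv_getSent_eq]

theorem pv_step (n : Int)
    (sa : List (String × Int) × List (List (String × Int)) × List (List Int) × List (List Int) × List (List Int) × List (List Int))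
    (sp : String × String) :
    pvProj (pvStepA n sa sp) = pvFused n (pvProj sa) sp := by
  unfold pvStepA pvFused pvOFused pvProj
  by_cases h : sp.1 = "ARTICLE_SPLIT_LINE\t0\n"
  · simp only [if_pos h]
    have := pv_emit_eq n sa.1 (sa.2.2.2.1, sa.2.2.2.2.1, sa.2.2.2.2.2, sa.2.2.1)
    simp [this]
  · simp [if_neg h]

theorem pv_fold (n : Int) (l : List (String × String))
    (sa : List (String × Int) × List (List (String × Int)) × List (List Int) × List (List Int) × List (List Int) × List (List Int)) :
    l.foldl (pvFused n) (pvProj sa) = pvProj (l.foldl (pvStepA n) sa) := by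
  induction l generalizing sa with
  | nil => rfl
  | cons x xs ih => rw [List.foldl_cons, List.foldl_cons, ← pv_step, ih]

-- fusing B's stage-2 and stage-3 folds into the single pvOFused fold
theorem pv_fuse (n : Int) (labels : List (Option Int)) (cur : List Int) (arts : List (List Int)) :
    labels.foldl (pvOFused n) (cur, arts.foldl (pvEmitStep n) ([], [], [], []))
      = ((labels.foldl pvSplitStep (cur, arts)).1,
         ((labels.foldl pvSplitStep (cur, arts)).2).foldl (pvEmitStep n) ([], [], [], [])) := by
  induction labels generalizing cur arts with
  | nil => rfl
  | cons x xs ih =>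
    cases x with
    | none =>
      simp only [List.foldl_cons, pvOFused, pvSplitStep]
      have hstep : List.foldl (pvEmitStep n) ([], [], [], []) (arts ++ [cur])
          = pvEmitStep n (List.foldl (pvEmitStep n) ([], [], [], []) arts) cur := by
        simp [List.foldl_append]
      rw [← hstep]
      exact ih [] (arts ++ [cur])
    | some v =>
      simp only [List.foldl_cons, pvOFused, pvSplitStep]
      exact ih (cur ++ [v]) arts

-- ===== VERDICT (by name: the statement is the Claim_ definition above) =====
theorem sent_types_counts_spec : Claim_equal_sent_types_counts := by
  intro sentences predictions n_sent add_one_pred _ _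
  unfold Spec_sent_types_counts sent_types_counts sent_types_counts_alt
  dsimp only
  have hfuse := pv_fuse n_sent
    ((sentences.zip (if add_one_pred then "0\n" :: predictions else predictions)).map (fun sp =>
      if sp.1 = "ARTICLE_SPLIT_LINE\t0\n" then none
      else some ((PySem.Int.ofStr? (PySem.Str.rstrip sp.2)).getD 0))) [] []
  simp only [List.foldl_nil] at hfuse
  have h2 := congrArg Prod.snd hfuse
  rw [List.foldl_map] at h2
  have h3 : (fun (st : List Int × List (List Int) × List (List Int) × List (List Int) × List (List Int))
      (sp : String × String) => pvOFused n_sent st (if sp.1 = "ARTICLE_SPLIT_LINE\t0\n" then none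
        else some ((PySem.Int.ofStr? (PySem.Str.rstrip sp.2)).getD 0))) = pvFused n_sent := rfl
  rw [h3] at h2
  dsimp only at h2
  rw [← h2]
  have h := pv_fold n_sent
    (sentences.zip (if add_one_pred then "0\n" :: predictions else predictions)) ([], [], [], [], [], [])
  simp only [pvProj, List.map_nil] at h
  rw [h]
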